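-- pv_equiv track=rewrite | github.com/nicolasdickenmann/builddatsetadvanced | network-design-main/topologies/topogen/OFTGenerator.py | get_MOLS
-- ===== SOURCE A (Python) =====
-- def get_MOLS(n : int) -> [[[int]]]:
--
--     mols = []
--     for k in range(1,n):
--         ols = []
--         for j in range(0,n):
--             row = []
--             for i in range(0,n):
--                 row.append((k*i + j) % n)
--             ols.append(row)
--         mols.append(ols)
--     return mols
-- ===== SOURCE B (Python) =====
-- def get_MOLS(n : int) -> [[[int]]]:
--     # One shared cyclic-shift table (rows built by range concatenation, no per-cell
--     # arithmetic); each square k is a column permutation of that table.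
--     shifts = [list(range(j, n)) + list(range(j)) for j in range(n)]
--     mols = []
--     for k in range(1, n):
--         perm = [(k * i) % n for i in range(n)]
--         mols.append([[row[p] for p in perm] for row in shifts])
--     return mols
-- ===== Notes on version B (the rewrite author's own statement) =====
-- stated objective: alternative
-- what changed: B builds one shared table of cyclic-shift rows by range concatenation (no per-cell arithmetic) and obtains each square k as a column permutation of that table via index lookup, replacing A's triple loop that computes (k*i+j) % n at every cell.
import Mathlib
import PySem

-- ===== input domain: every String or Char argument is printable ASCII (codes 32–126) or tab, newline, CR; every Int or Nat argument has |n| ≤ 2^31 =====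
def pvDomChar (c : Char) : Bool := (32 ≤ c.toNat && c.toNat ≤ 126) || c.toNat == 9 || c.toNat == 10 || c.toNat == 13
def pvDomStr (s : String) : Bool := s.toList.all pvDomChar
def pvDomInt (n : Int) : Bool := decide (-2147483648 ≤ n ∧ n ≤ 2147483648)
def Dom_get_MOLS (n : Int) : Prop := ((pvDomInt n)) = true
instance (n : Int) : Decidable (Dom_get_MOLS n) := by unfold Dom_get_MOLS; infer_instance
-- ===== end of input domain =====

-- B builds one shared cyclic-shift table and forms each square as a column permutation of it
-- (lookup instead of per-cell arithmetic); same values as A (alternative algorithm, no speed claim).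


-- ===== PORT A =====
-- triple loop: for k in range(1,n): for j in range(0,n): row = [(k*i+j) % n for i in range(0,n)]
def get_MOLS (n : Int) : List (List (List Int)) :=
  (PySem.List.pyRange 1 n 1).map (fun k =>
    (PySem.List.pyRange 0 n 1).map (fun j =>
      (PySem.List.pyRange 0 n 1).map (fun i => PySem.Int.mod (k * i + j) n)))

-- ===== PORT B =====
-- shifts[j] = list(range(j,n)) + list(range(j)); square k = column permutation of shifts
def get_MOLS_alt (n : Int) : List (List (List Int)) :=
  let shifts := (PySem.List.pyRange 0 n 1).map (fun j =>
    PySem.List.pyRange j n 1 ++ PySem.List.pyRange 0 j 1)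
  (PySem.List.pyRange 1 n 1).map (fun k =>
    let perm := (PySem.List.pyRange 0 n 1).map (fun i => PySem.Int.mod (k * i) n)
    shifts.map (fun row => perm.map (fun p => PySem.List.pyGetD row p 0)))

-- ===== PRECONDITION & SPEC =====
def Spec_get_MOLS (n : Int) (out : List (List (List Int))) : Prop := out = get_MOLS_alt n
instance (n : Int) (out : List (List (List Int))) : Decidable (Spec_get_MOLS n out) := by unfold Spec_get_MOLS; infer_instance

-- ===== CLAIM (what is proved, stated in full; the proofs are below) =====
def Claim_equal_get_MOLS : Prop := ∀ (n : Int), Dom_get_MOLS n → Spec_get_MOLS n (get_MOLS n)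

-- ===== LEMMAS AND PROOFS =====

-- indexing the cyclic-shift row: (range(j,n)+range(j))[p] = (p+j) % n, for 0 ≤ p,j < n
lemma shift_row_get (n j p : Int) (hj0 : 0 ≤ j) (hjn : j < n) (hp0 : 0 ≤ p) (hpn : p < n) :
    PySem.List.pyGetD (PySem.List.pyRange j n 1 ++ PySem.List.pyRange 0 j 1) p 0
      = PySem.Int.mod (p + j) n := by
  have hlen1 : (PySem.List.pyRange j n 1).length = (n - j).toNat :=
    PySem.List.length_pyRange_one j n
  have hlen2 : (PySem.List.pyRange 0 j 1).length = (j - 0).toNat :=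
    PySem.List.length_pyRange_one 0 j
  have hlen : (PySem.List.pyRange j n 1 ++ PySem.List.pyRange 0 j 1).length = n.toNat := by
    rw [List.length_append, hlen1, hlen2]; omega
  rw [PySem.List.pyGetD_eq_getElem _ 0 hp0 (by rw [hlen]; omega)]
  rw [PySem.Int.mod_eq_emod_of_pos (by omega)]
  by_cases h : p.toNat < (PySem.List.pyRange j n 1).length
  · rw [List.getElem_append_left h, PySem.List.getElem_pyRange_one]
    rw [hlen1] at h
    rw [Int.emod_eq_of_lt (by omega) (by omega)]
    omega
  · rw [List.getElem_append_right (by omega), PySem.List.getElem_pyRange_one]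
    rw [hlen1] at h ⊢
    rw [← Int.sub_emod_right (p + j) n, Int.emod_eq_of_lt (by omega) (by omega)]
    omega

-- ===== VERDICT (by name: the statement is the Claim_ definition above) =====
theorem get_MOLS_spec : Claim_equal_get_MOLS := by
  intro n _
  unfold Spec_get_MOLS get_MOLS get_MOLS_alt
  simp only []
  refine List.map_congr_left (fun k hk => ?_)
  have hk' := (PySem.List.mem_pyRange_one).1 hk
  simp only [List.map_map]
  refine List.map_congr_left (fun j hj => ?_)
  have hj' := (PySem.List.mem_pyRange_one).1 hj
  simp only [Function.comp]
  refine List.map_congr_left (fun i hi => ?_)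
  have hi' := (PySem.List.mem_pyRange_one).1 hi
  simp only [Function.comp]
  have hn : (0:Int) < n := by omega
  rw [shift_row_get n j (PySem.Int.mod (k * i) n) hj'.1 hj'.2
        (PySem.Int.mod_nonneg _ hn) (PySem.Int.mod_lt _ hn)]
  rw [PySem.Int.mod_eq_emod_of_pos hn, PySem.Int.mod_eq_emod_of_pos hn,
      PySem.Int.mod_eq_emod_of_pos hn]
  calc (k * i + j) % n
      = (k * i % n + j % n) % n := by rw [← Int.add_emod]
    _ = ((k * i % n) % n + j % n) % n := by rw [Int.emod_emod_of_dvd _ dvd_rfl]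
    _ = (k * i % n + j) % n := by rw [← Int.add_emod, Int.add_emod (k * i % n) j]
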